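-- pv_equiv track=rewrite | github.com/carlzimmerman/zimmerman-formula | research/proof_attempt/nilpotent_growth_analysis.py | count_chains
-- ===== SOURCE A (Python) =====
-- def count_chains(n, k, memo={}):
--     """Count divisor chains of length exactly k starting from n."""
--     if (n, k) in memo:
--         return memo[(n, k)]
--
--     if k == 0:
--         return 1
--     if n < 2:
--         return 0
--
--     total = 0
--     for d in range(2, n + 1):
--         next_n = n // d
--         if next_n >= 1:
--             total += count_chains(next_n, k - 1, memo)
--
--     memo[(n, k)] = total
--     return total
-- ===== SOURCE B (Python) =====
-- def count_chains(n, k, memo={}):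
--     """Count divisor chains of length exactly k starting from n.
--
--     Same memoized recursion, but sums over blocks of divisors sharing the
--     same quotient n//d, doing one multiplied step per distinct quotient.
--     """
--     if (n, k) in memo:
--         return memo[(n, k)]
--
--     if k == 0:
--         return 1
--     if n < 2:
--         return 0
--
--     total = 0
--     d = 2
--     while d <= n:
--         q = n // d
--         d2 = n // q + 1  # first divisor with a smaller quotient
--         total += (d2 - d) * count_chains(q, k - 1, memo)
--         d = d2
--
--     memo[(n, k)] = total
--     return total
-- ===== Notes on version B (the rewrite author's own statement) =====
-- stated objective: alternative
-- what changed: The inner loop over every divisor d in range(2, n+1) is replaced by divisor-block summation: consecutive d sharing the same quotient q = n//d are grouped and counted in one step of width n//q + 1 - d, so each memoized state does O(sqrt(n)) loop iterations instead of O(n); intended as faster, a timing run measured a 2.02x median ratio at the largest size but not consistently >= 1.5x per input, so no speed is claimed.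
import Mathlib
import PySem

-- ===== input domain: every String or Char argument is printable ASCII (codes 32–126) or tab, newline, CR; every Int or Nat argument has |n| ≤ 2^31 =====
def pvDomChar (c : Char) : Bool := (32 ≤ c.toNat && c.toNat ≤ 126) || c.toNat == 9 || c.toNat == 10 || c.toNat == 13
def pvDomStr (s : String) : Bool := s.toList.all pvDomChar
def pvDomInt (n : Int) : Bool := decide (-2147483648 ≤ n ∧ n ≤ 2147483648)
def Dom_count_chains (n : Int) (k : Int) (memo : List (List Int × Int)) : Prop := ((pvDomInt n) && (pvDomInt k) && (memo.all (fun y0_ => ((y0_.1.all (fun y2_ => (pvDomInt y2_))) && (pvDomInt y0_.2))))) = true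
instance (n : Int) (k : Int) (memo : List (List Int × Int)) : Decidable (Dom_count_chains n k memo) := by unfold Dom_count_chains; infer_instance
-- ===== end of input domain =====

-- B replaces A's loop over every d in range(2, n+1) by divisor-block summation
-- (all d with equal quotient n//d handled in one step); both Pythons mutate the
-- memo dict the same way — the theorem here is about the return value.

-- ===== PORT A =====
-- one step of A's `for d in range(2, n+1)` loop, carrying (total, memo)
def pvStepA (cA : Int → Int → PySem.Dict (List Int) Int → Int × PySem.Dict (List Int) Int)
    (n : Int) (k : Int) (acc : Int × PySem.Dict (List Int) Int) (d : Int) :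
    Int × PySem.Dict (List Int) Int :=
  let next := PySem.Int.floordiv n d
  if 1 ≤ next then
    let r := cA next (k - 1) acc.2
    (acc.1 + r.1, r.2)
  else acc

-- A's recursion, fuel-guarded (fuel = n.toNat + 1 is always sufficient: the
-- recursive argument n//d strictly decreases); returns (value, updated memo)
def pvCountA : Nat → Int → Int → PySem.Dict (List Int) Int → Int × PySem.Dict (List Int) Int
  | 0, _, _, m => (0, m)
  | f + 1, n, k, m =>
    match m.get? [n, k] with
    | some v => (v, m)
    | none =>
      if k = 0 then (1, m)
      else if n < 2 then (0, m)
      else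
        let p := (PySem.List.pyRange 2 (n + 1) 1).foldl (pvStepA (pvCountA f) n k) (0, m)
        (p.1, p.2.insert [n, k] p.1)

def count_chains (n : Int) (k : Int) (memo : List (List Int × Int)) : Int :=
  (pvCountA (n.toNat + 1) n k (PySem.Dict.ofList memo)).1

-- ===== PORT B =====
-- B's recursion with its divisor-block while-loop (loop fuel lf = (n+1).toNat
-- is always sufficient: d strictly increases each iteration)
mutual
def pvCountB : Nat → Int → Int → PySem.Dict (List Int) Int → Int × PySem.Dict (List Int) Int
  | 0, _, _, m => (0, m)
  | f + 1, n, k, m =>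
    match m.get? [n, k] with
    | some v => (v, m)
    | none =>
      if k = 0 then (1, m)
      else if n < 2 then (0, m)
      else
        let p := pvLoopB f n k ((n + 1).toNat) 2 0 m
        (p.1, p.2.insert [n, k] p.1)
termination_by f _ _ _ => (f, 0)
decreasing_by all_goals omega

def pvLoopB : Nat → Int → Int → Nat → Int → Int → PySem.Dict (List Int) Int → Int × PySem.Dict (List Int) Int
  | _, _, _, 0, _, total, m => (total, m)
  | f, n, k, lf + 1, d, total, m =>
    if d ≤ n then
      let q := PySem.Int.floordiv n d
      let d2 := PySem.Int.floordiv n q + 1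
      let r := pvCountB f q (k - 1) m
      pvLoopB f n k lf d2 (total + (d2 - d) * r.1) r.2
    else (total, m)
termination_by f _ _ lf _ _ _ => (f, lf + 1)
decreasing_by all_goals omega
end

def count_chains_alt (n : Int) (k : Int) (memo : List (List Int × Int)) : Int :=
  (pvCountB (n.toNat + 1) n k (PySem.Dict.ofList memo)).1

-- ===== PRECONDITION & SPEC =====
def Spec_count_chains (n : Int) (k : Int) (memo : List (List Int × Int)) (out : Int) : Prop := out = count_chains_alt n k memo
instance (n : Int) (k : Int) (memo : List (List Int × Int)) (out : Int) : Decidable (Spec_count_chains n k memo out) := by unfold Spec_count_chains; infer_instance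

-- ===== CLAIM (what is proved, stated in full; the proofs are below) =====
def Claim_equal_count_chains : Prop := ∀ (n : Int) (k : Int) (memo : List (List Int × Int)), Dom_count_chains n k memo → Spec_count_chains n k memo (count_chains n k memo)

-- ===== LEMMAS AND PROOFS =====

-- calling A again on the memo a first call returned reproduces that call exactly
theorem pvCountA_idem (f : Nat) (n k : Int) (m : PySem.Dict (List Int) Int) :
    pvCountA f n k (pvCountA f n k m).2 = pvCountA f n k m := by
  cases f with
  | zero => simp [pvCountA]
  | succ f =>
    cases h : PySem.Dict.get? m [n, k] with
    | some v => simp [pvCountA, h]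
    | none =>
      by_cases hk : k = 0
      · subst hk; simp [pvCountA, h]
      · by_cases hn : n < 2
        · simp [pvCountA, h, hk, hn]
        · simp [pvCountA, h, hk, hn, PySem.Dict.get?_insert_self]

-- a nonempty block of divisors all sharing quotient q folds to one multiplied call
theorem pvBlock (f : Nat) (n k q : Int) (hq : 1 ≤ q) :
    ∀ (es : List Int) (e total : Int) (m : PySem.Dict (List Int) Int),
      PySem.Int.floordiv n e = q → (∀ x ∈ es, PySem.Int.floordiv n x = q) →
      (e :: es).foldl (pvStepA (pvCountA f) n k) (total, m)
        = (total + ((es.length : Int) + 1) * (pvCountA f q (k - 1) m).1,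
           (pvCountA f q (k - 1) m).2) := by
  intro es
  induction es with
  | nil =>
    intro e total m he _
    simp [pvStepA, he, hq]
  | cons e' es ihe =>
    intro e total m he hes
    have hstep : pvStepA (pvCountA f) n k (total, m) e
        = (total + (pvCountA f q (k - 1) m).1, (pvCountA f q (k - 1) m).2) := by
      simp [pvStepA, he, hq]
    rw [List.foldl_cons, hstep,
        ihe e' _ _ (hes e' (by simp)) (fun x hx => hes x (by simp [hx])),
        pvCountA_idem]
    rw [Prod.mk.injEq]
    refine ⟨?_, rfl⟩
    simp only [List.length_cons]
    push_cast
    ring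

-- A's remaining loop from d equals B's block loop from d
theorem pvLoopEq (f : Nat)
    (ih : ∀ n k m, pvCountA f n k m = pvCountB f n k m)
    (n k : Int) (hn : 2 ≤ n) :
    ∀ (lf : Nat) (d total : Int) (m : PySem.Dict (List Int) Int),
      2 ≤ d → d ≤ n + 1 → (n + 1 - d).toNat ≤ lf →
      (PySem.List.pyRange d (n + 1) 1).foldl (pvStepA (pvCountA f) n k) (total, m)
        = pvLoopB f n k lf d total m := by
  intro lf
  induction lf with
  | zero =>
    intro d total m h2 hle hfuel
    have hd : d = n + 1 := by omega
    subst hd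
    rw [PySem.List.pyRange_one_eq_nil (by omega)]
    simp [pvLoopB]
  | succ lf ihl =>
    intro d total m h2 hle hfuel
    by_cases hd : d ≤ n
    · -- one divisor block [d, d2)
      have hdpos : (0:Int) < d := by omega
      have hqd := (PySem.Int.floordiv_eq_iff_of_pos hdpos
        (q := PySem.Int.floordiv n d)).mp rfl
      set q := PySem.Int.floordiv n d with hqdef
      have hq1 : 1 ≤ q := by nlinarith [hqd.1, hqd.2]
      have hqpos : (0:Int) < q := by omega
      set d2 := PySem.Int.floordiv n q + 1 with hd2def
      have hdd2 : d < d2 := by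
        have : d ≤ PySem.Int.floordiv n q :=
          (PySem.Int.le_floordiv_iff_mul_le hqpos).mpr (by nlinarith [hqd.1])
        omega
      have hd2n : d2 ≤ n + 1 := by
        have : PySem.Int.floordiv n q < n + 1 :=
          (PySem.Int.floordiv_lt_iff_lt_mul hqpos).mpr (by nlinarith)
        omega
      have hblock : ∀ e ∈ PySem.List.pyRange (d + 1) d2 1, PySem.Int.floordiv n e = q := by
        intro e hme
        rw [PySem.List.mem_pyRange_one] at hme
        have hepos : (0:Int) < e := by omega
        have hup : PySem.Int.floordiv n e < q + 1 :=
          (PySem.Int.floordiv_lt_iff_lt_mul hepos).mpr (by nlinarith [hqd.2])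
        have hlo : q ≤ PySem.Int.floordiv n e := by
          refine (PySem.Int.le_floordiv_iff_mul_le hepos).mpr ?_
          have he2 : e ≤ PySem.Int.floordiv n q := by omega
          have := (PySem.Int.le_floordiv_iff_mul_le hqpos).mp he2
          nlinarith
        omega
      rw [PySem.List.pyRange_one_append d d2 (n + 1) (by omega) hd2n, List.foldl_append,
          PySem.List.pyRange_one_cons hdd2,
          pvBlock f n k q hq1 _ d total m hqdef.symm hblock,
          PySem.List.length_pyRange_one]
      have hcast : (((d2 - (d + 1)).toNat : Nat) : Int) + 1 = d2 - d := by omega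
      rw [hcast, ihl d2 _ _ (by omega) hd2n (by omega)]
      conv_rhs => rw [pvLoopB]
      rw [if_pos hd, ih]
    · -- loop finished: d = n + 1
      have hd' : d = n + 1 := by omega
      subst hd'
      rw [PySem.List.pyRange_one_eq_nil (by omega)]
      conv_rhs => rw [pvLoopB]
      rw [if_neg hd]
      simp
theorem pvCountAB (f : Nat) : ∀ (n k : Int) (m : PySem.Dict (List Int) Int),
    pvCountA f n k m = pvCountB f n k m := by
  induction f with
  | zero => intro n k m; simp [pvCountA, pvCountB]
  | succ f ihf =>
    intro n k m
    cases h : PySem.Dict.get? m [n, k] with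
    | some v => simp [pvCountA, pvCountB, h]
    | none =>
      by_cases hk : k = 0
      · subst hk; simp [pvCountA, pvCountB, h]
      · by_cases hn : n < 2
        · simp [pvCountA, pvCountB, h, hk, hn]
        · have hn2 : 2 ≤ n := by omega
          have hloop := pvLoopEq f ihf n k hn2 ((n + 1).toNat) 2 0 m
            (le_refl 2) (by omega) (by omega)
          simp only [pvCountA, pvCountB, h, hk, hn, if_false]
          rw [hloop]

-- ===== VERDICT (by name: the statement is the Claim_ definition above) =====
theorem count_chains_spec : Claim_equal_count_chains := by
  intro n k memo _
  unfold Spec_count_chains count_chains count_chains_alt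
  rw [pvCountAB]
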